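-- pv_equiv track=rewrite | github.com/justinluu8235/intro-to-python | app.py | parse_by_cities
-- ===== SOURCE A (Python) =====
-- def parse_by_cities(students):
--     '''
--     Return a dictionary that has a key for each cities
--     and a list of students for each city
--     '''
--     result = {}
--     for student in students:
--         # if city is not in the dictionary, add the city and set an array with the
--         if(student.get('city')):
--             city = student.get('city')
--             if not result.get(city):
--                 result[city] = [student.get('name')]
--             # if city is in the dictionary, append student name
--             else:
--                 result[city].append(student.get('name'))
--
--     return result
-- ===== SOURCE B (Python) =====
-- def parse_by_cities(students):
--     # Two-pass: collect distinct truthy cities in first-appearance order,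
--     # then build each city's name list with one comprehension scan.
--     cities = []
--     for s in students:
--         c = s.get('city')
--         if c and c not in cities:
--             cities.append(c)
--     return {c: [s.get('name') for s in students if s.get('city') == c]
--             for c in cities}
-- ===== Notes on version B (the rewrite author's own statement) =====
-- stated objective: alternative
-- what changed: Replaces the incremental dict-build with conditional insert/append by a two-pass scheme: first collect the distinct truthy cities in first-appearance order, then build the whole result as a dict comprehension that filters the student list once per city.
-- outside the precondition, e.g. on parse_by_cities([{'city': 'x'}]): A returns {'x': [None]}, B returns {'x': [None]}
import Mathlib
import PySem

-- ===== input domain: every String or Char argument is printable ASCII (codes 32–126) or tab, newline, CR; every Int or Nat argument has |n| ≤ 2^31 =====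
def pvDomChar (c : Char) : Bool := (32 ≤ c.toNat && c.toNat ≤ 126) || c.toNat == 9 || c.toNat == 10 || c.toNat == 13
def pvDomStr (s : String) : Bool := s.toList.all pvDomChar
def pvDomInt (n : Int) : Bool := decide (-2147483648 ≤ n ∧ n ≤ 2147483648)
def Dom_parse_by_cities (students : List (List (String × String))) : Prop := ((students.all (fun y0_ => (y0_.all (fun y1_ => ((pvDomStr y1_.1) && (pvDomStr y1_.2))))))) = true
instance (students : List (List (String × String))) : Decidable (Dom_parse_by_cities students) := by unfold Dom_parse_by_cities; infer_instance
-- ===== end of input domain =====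

-- B groups by two passes (distinct truthy cities in first-appearance order, then one filtering scan
-- per city) instead of A's single-pass incremental dict build; same return value everywhere on Pre_.

-- student.get('name'); Pre_ guarantees the key is present wherever the value is used, so the "" default is never the result
def pvName (s : List (String × String)) : String := (List.lookup "name" s).getD ""

-- ===== PORT A =====
-- the body of A's for-loop
def pvStepA (result : List (String × List String)) (student : List (String × String)) : List (String × List String) :=
  match List.lookup "city" student with
  | none => result                        -- if(student.get('city')) falsy
  | some c =>
    if c = "" then result                 -- falsy city
    else
      match List.lookup c result with
      | some (_ :: _) => result.map (fun p => if p.1 = c then (p.1, p.2 ++ [pvName student]) else p)  -- result[city].append(...)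
      | _ => result ++ [(c, [pvName student])]  -- not result.get(city): result[city] = [...]

def parse_by_cities (students : List (List (String × String))) : List (String × List String) :=
  students.foldl pvStepA []

-- ===== PORT B =====
-- the body of B's first loop: collect distinct truthy cities in first-appearance order
def pvStepC (cs : List String) (s : List (String × String)) : List String :=
  match List.lookup "city" s with
  | some c => if c ≠ "" ∧ c ∉ cs then cs ++ [c] else cs
  | none => cs

-- the comprehension [s.get('name') for s in students if s.get('city') == c]
def pvNames (students : List (List (String × String))) (c : String) : List String :=
  (students.filter (fun s => List.lookup "city" s == some c)).map pvName

def parse_by_cities_alt (students : List (List (String × String))) : List (String × List String) :=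
  (students.foldl pvStepC []).map (fun c => (c, pvNames students c))

-- ===== PRECONDITION & SPEC =====
-- Pre_ excludes students that carry a truthy 'city' but no 'name' key: there Python A (and B) put
-- None — not a str — into the returned lists, which is outside the declared value type.
def Pre_parse_by_cities (students : List (List (String × String))) : Prop :=
  (students.all (fun s =>
    match List.lookup "city" s with
    | some c => (c = "") || (List.lookup "name" s).isSome
    | none => true)) = true
instance (students : List (List (String × String))) : Decidable (Pre_parse_by_cities students) := by unfold Pre_parse_by_cities; infer_instance

def pvWitness_parse_by_cities : (List (List (String × String))) :=
  [[("city", "NY"), ("name", "Al")], [("name", "Bo")], [("city", ""), ("age", "3")]]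

def Spec_parse_by_cities (students : List (List (String × String))) (out : List (String × List String)) : Prop := out = parse_by_cities_alt students
instance (students : List (List (String × String))) (out : List (String × List String)) : Decidable (Spec_parse_by_cities students out) := by unfold Spec_parse_by_cities; infer_instance

-- ===== CLAIM (what is proved, stated in full; the proofs are below) =====
def Claim_equal_parse_by_cities : Prop := ∀ (students : List (List (String × String))), Dom_parse_by_cities students → Pre_parse_by_cities students → Spec_parse_by_cities students (parse_by_cities students)

-- ===== LEMMAS AND PROOFS =====

-- membership in B's city accumulator
theorem mem_foldl_stepC (l : List (List (String × String))) (cs : List String) (c : String) :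
    c ∈ l.foldl pvStepC cs ↔ c ∈ cs ∨ (c ≠ "" ∧ ∃ s ∈ l, List.lookup "city" s = some c) := by
  induction l generalizing cs with
  | nil => simp
  | cons s l ih =>
    rw [List.foldl_cons, ih]
    have hstep : ∀ x, x ∈ pvStepC cs s ↔ x ∈ cs ∨ (x ≠ "" ∧ List.lookup "city" s = some x) := by
      intro x
      cases h : List.lookup "city" s with
      | none => simp [pvStepC, h]
      | some c0 =>
        simp only [pvStepC, h]
        split_ifs with hcnd
        · simp only [List.mem_append, List.mem_singleton, Option.some.injEq]
          constructor
          · rintro (h1 | rfl)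
            · exact Or.inl h1
            · exact Or.inr ⟨hcnd.1, rfl⟩
          · rintro (h1 | ⟨hne, rfl⟩)
            · exact Or.inl h1
            · exact Or.inr rfl
        · simp only [Option.some.injEq]
          constructor
          · exact Or.inl
          · rintro (h1 | ⟨hne, rfl⟩)
            · exact h1
            · rcases not_and_or.mp hcnd with h2 | h2
              · exact absurd (not_not.mp h2) hne
              · exact not_not.mp h2
    rw [hstep c]
    constructor
    · rintro ((h1 | ⟨hne, hp⟩) | ⟨hne, s', hs', hp⟩)
      · exact Or.inl h1
      · exact Or.inr ⟨hne, s, List.mem_cons_self, hp⟩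
      · exact Or.inr ⟨hne, s', List.mem_cons_of_mem s hs', hp⟩
    · rintro (h1 | ⟨hne, s', hs', hp⟩)
      · exact Or.inl (Or.inl h1)
      · rcases List.mem_cons.mp hs' with rfl | hs'
        · exact Or.inl (Or.inr ⟨hne, hp⟩)
        · exact Or.inr ⟨hne, s', hs', hp⟩

-- first-match lookup in a graph list
theorem lookup_map_graph (cs : List String) (f : String → List String) (c : String) :
    List.lookup c (cs.map (fun x => (x, f x))) = if c ∈ cs then some (f c) else none := by
  induction cs with
  | nil => simp
  | cons x cs ih =>
    simp only [List.map_cons, List.lookup_cons, List.mem_cons]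
    by_cases h : c = x
    · subst h; simp
    · have hb : (c == x) = false := by simpa using h
      simp [hb, h, ih]

-- extending the student list by one student extends each city's name list
theorem pvNames_append (l : List (List (String × String))) (s : List (String × String)) (c : String) :
    pvNames (l ++ [s]) c =
      pvNames l c ++ (if List.lookup "city" s == some c then [pvName s] else []) := by
  unfold pvNames
  rw [List.filter_append, List.map_append]
  congr 1
  by_cases hb : (List.lookup "city" s == some c) = true
  · simp [hb]
  · simp [hb]

-- the central invariant: A's accumulated dict is B's graph of the processed prefix
theorem parse_by_cities_eq (l : List (List (String × String))) :
    l.foldl pvStepA [] = (l.foldl pvStepC []).map (fun c => (c, pvNames l c)) := by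
  induction l using List.reverseRecOn with
  | nil => rfl
  | append_singleton l s ih =>
    rw [List.foldl_append, List.foldl_append, ih]
    simp only [List.foldl_cons, List.foldl_nil]
    set C := l.foldl pvStepC [] with hC
    have hmemC : ∀ c ∈ C, c ≠ "" ∧ ∃ s' ∈ l, List.lookup "city" s' = some c := by
      intro c hc
      have := (mem_foldl_stepC l [] c).mp hc
      simpa using this
    cases h : List.lookup "city" s with
    | none =>
      simp only [pvStepA, pvStepC, h]
      rw [List.map_congr_left]
      intro c hc
      rw [pvNames_append, h]
      simp
    | some c0 =>
      by_cases h0 : c0 = ""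
      · subst h0
        simp only [pvStepA, pvStepC, h]
        rw [if_pos trivial, if_neg (fun hc => hc.1 rfl)]
        rw [List.map_congr_left]
        intro c hc
        rw [pvNames_append, h]
        have hcne : c ≠ "" := (hmemC c hc).1
        have : (some "" == some c) = false := by simpa using fun e => hcne e
        simp [this]
      · simp only [pvStepA, pvStepC, h, if_neg h0]
        by_cases hmem : c0 ∈ C
        · -- existing city: append to its list in place
          have hne : pvNames l c0 ≠ [] := by
            obtain ⟨_, s', hs', hlook⟩ := hmemC c0 hmem
            unfold pvNames
            simp only [ne_eq, List.map_eq_nil_iff, List.filter_eq_nil_iff, not_forall]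
            exact ⟨s', hs', by simp [hlook]⟩
          have hlk : List.lookup c0 (C.map (fun c => (c, pvNames l c))) = some (pvNames l c0) := by
            rw [lookup_map_graph, if_pos hmem]
          rw [if_neg (fun hcnd => hcnd.2 hmem)]
          cases hcase : pvNames l c0 with
          | nil => exact absurd hcase hne
          | cons n ns =>
            simp only [hlk, hcase, List.map_map]
            rw [List.map_congr_left]
            intro c hc
            rw [pvNames_append, h]
            simp only [Function.comp_apply]
            by_cases hcc : c = c0
            · subst hcc
              simp
            · have hb : (some c0 == some c) = false := by simpa using fun e => hcc e.symm
              simp [hb, hcc]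
        · -- new city: appended at the end
          have hnil : pvNames l c0 = [] := by
            unfold pvNames
            simp only [List.map_eq_nil_iff, List.filter_eq_nil_iff]
            intro s' hs'
            simp only [beq_iff_eq]
            intro hlook
            exact hmem ((mem_foldl_stepC l [] c0).mpr (Or.inr ⟨h0, s', hs', hlook⟩))
          have hlk : List.lookup c0 (C.map (fun c => (c, pvNames l c))) = none := by
            rw [lookup_map_graph, if_neg hmem]
          rw [if_pos ⟨h0, hmem⟩]
          simp only [hlk, List.map_append, List.map_singleton]
          congr 1
          · rw [List.map_congr_left]
            intro c hc
            rw [pvNames_append, h]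
            have hb : (some c0 == some c) = false := by
              simpa using fun (e : c0 = c) => hmem (show c0 ∈ C from e ▸ hc)
            simp [hb]
          · rw [pvNames_append, h, hnil]
            simp

-- ===== VERDICT (by name: the statement is the Claim_ definition above) =====
theorem parse_by_cities_spec : Claim_equal_parse_by_cities := by
  intro students _ _
  unfold Spec_parse_by_cities parse_by_cities parse_by_cities_alt
  exact parse_by_cities_eq students
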